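-- pv_equiv track=rewrite | github.com/foxnb/second-brain-bot | main.py | iana_to_display
-- ===== SOURCE A (Python) =====
-- _OFFSET_TO_IANA = {
--     -12: "Etc/GMT+12",
--     -11: "Pacific/Pago_Pago",
--     -10: "Pacific/Honolulu",
--     -9: "America/Anchorage",
--     -8: "America/Los_Angeles",
--     -7: "America/Denver",
--     -6: "America/Chicago",
--     -5: "America/New_York",
--     -4: "America/Halifax",
--     -3: "America/Sao_Paulo",
--     -2: "Atlantic/South_Georgia",
--     -1: "Atlantic/Azores",
--     0: "Etc/GMT",
--     1: "Europe/London",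
--     2: "Europe/Berlin",
--     3: "Europe/Moscow",
--     4: "Asia/Dubai",
--     5: "Asia/Karachi",
--     6: "Asia/Almaty",
--     7: "Asia/Bangkok",
--     8: "Asia/Shanghai",
--     9: "Asia/Tokyo",
--     10: "Australia/Sydney",
--     11: "Pacific/Noumea",
--     12: "Pacific/Auckland",
--     13: "Pacific/Apia",
--     14: "Pacific/Kiritimati",
-- }
--
-- _FRACTIONAL_TO_IANA = {
--     "+3:30": "Asia/Tehran",
--     "+4:30": "Asia/Kabul",
--     "+5:30": "Asia/Kolkata",
--     "+5:45": "Asia/Kathmandu",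
--     "+6:30": "Asia/Yangon",
--     "+9:30": "Australia/Darwin",
--     "-3:30": "America/St_Johns",
--     "-9:30": "Pacific/Marquesas",
-- }
--
-- def iana_to_display(tz: str) -> str:
--     for offset, zone in _OFFSET_TO_IANA.items():
--         if zone == tz:
--             if offset == 0:
--                 return "UTC±0"
--             sign = "+" if offset > 0 else ""
--             return f"UTC{sign}{offset}"
--
--     for offset_str, zone in _FRACTIONAL_TO_IANA.items():
--         if zone == tz:
--             return f"UTC{offset_str}"
--
--     return tz
-- ===== SOURCE B (Python) =====
-- # Flat, hand-written zone -> finished display table: one O(1) dict lookup,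
-- # no runtime scanning or formatting at all.
-- _DISPLAY = {
--     "Etc/GMT+12": "UTC-12",
--     "Pacific/Pago_Pago": "UTC-11",
--     "Pacific/Honolulu": "UTC-10",
--     "America/Anchorage": "UTC-9",
--     "America/Los_Angeles": "UTC-8",
--     "America/Denver": "UTC-7",
--     "America/Chicago": "UTC-6",
--     "America/New_York": "UTC-5",
--     "America/Halifax": "UTC-4",
--     "America/Sao_Paulo": "UTC-3",
--     "Atlantic/South_Georgia": "UTC-2",
--     "Atlantic/Azores": "UTC-1",
--     "Etc/GMT": "UTC±0",
--     "Europe/London": "UTC+1",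
--     "Europe/Berlin": "UTC+2",
--     "Europe/Moscow": "UTC+3",
--     "Asia/Dubai": "UTC+4",
--     "Asia/Karachi": "UTC+5",
--     "Asia/Almaty": "UTC+6",
--     "Asia/Bangkok": "UTC+7",
--     "Asia/Shanghai": "UTC+8",
--     "Asia/Tokyo": "UTC+9",
--     "Australia/Sydney": "UTC+10",
--     "Pacific/Noumea": "UTC+11",
--     "Pacific/Auckland": "UTC+12",
--     "Pacific/Apia": "UTC+13",
--     "Pacific/Kiritimati": "UTC+14",
--     "Asia/Tehran": "UTC+3:30",
--     "Asia/Kabul": "UTC+4:30",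
--     "Asia/Kolkata": "UTC+5:30",
--     "Asia/Kathmandu": "UTC+5:45",
--     "Asia/Yangon": "UTC+6:30",
--     "Australia/Darwin": "UTC+9:30",
--     "America/St_Johns": "UTC-3:30",
--     "Pacific/Marquesas": "UTC-9:30",
-- }
--
--
-- def iana_to_display(tz: str) -> str:
--     return _DISPLAY.get(tz, tz)
-- ===== Notes on version B (the rewrite author's own statement) =====
-- stated objective: idiomatic
-- what changed: A's two linear scans with inline sign formatting are replaced by one flat literal zone-to-display dict and a single .get lookup; no offset arithmetic or string formatting remains at call time.
import Mathlib
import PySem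

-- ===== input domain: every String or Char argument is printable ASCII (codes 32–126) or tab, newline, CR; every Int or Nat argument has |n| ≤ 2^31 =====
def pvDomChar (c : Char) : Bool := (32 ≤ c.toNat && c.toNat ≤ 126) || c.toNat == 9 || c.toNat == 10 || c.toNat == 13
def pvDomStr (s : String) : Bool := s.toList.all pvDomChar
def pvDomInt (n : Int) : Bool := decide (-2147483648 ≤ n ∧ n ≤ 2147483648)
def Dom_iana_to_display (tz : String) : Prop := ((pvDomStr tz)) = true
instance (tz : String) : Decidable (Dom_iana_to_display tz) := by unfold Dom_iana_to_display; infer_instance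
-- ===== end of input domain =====

-- B replaces A's two linear scans with inline sign formatting by one flat literal
-- zone→display dict and a single lookup (objective: idiomatic; same result everywhere).

-- ===== PORT A =====
-- module constants of A (the two dicts)
def pvOffsetMap : List (Int × String) := [(-12, "Etc/GMT+12"), (-11, "Pacific/Pago_Pago"), (-10, "Pacific/Honolulu"), (-9, "America/Anchorage"), (-8, "America/Los_Angeles"), (-7, "America/Denver"), (-6, "America/Chicago"), (-5, "America/New_York"), (-4, "America/Halifax"), (-3, "America/Sao_Paulo"), (-2, "Atlantic/South_Georgia"), (-1, "Atlantic/Azores"), (0, "Etc/GMT"), (1, "Europe/London"), (2, "Europe/Berlin"), (3, "Europe/Moscow"), (4, "Asia/Dubai"), (5, "Asia/Karachi"), (6, "Asia/Almaty"), (7, "Asia/Bangkok"), (8, "Asia/Shanghai"), (9, "Asia/Tokyo"), (10, "Australia/Sydney"), (11, "Pacific/Noumea"), (12, "Pacific/Auckland"), (13, "Pacific/Apia"), (14, "Pacific/Kiritimati")]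

def pvFracMap : List (String × String) := [("+3:30", "Asia/Tehran"), ("+4:30", "Asia/Kabul"), ("+5:30", "Asia/Kolkata"), ("+5:45", "Asia/Kathmandu"), ("+6:30", "Asia/Yangon"), ("+9:30", "Australia/Darwin"), ("-3:30", "America/St_Johns"), ("-9:30", "Pacific/Marquesas")]

-- first loop: scan the integer map, return the formatted offset for the first matching zone
def pvLoopA1 (tz : String) : List (Int × String) → Option String
  | [] => none
  | (offset, zone) :: rest =>
    if zone == tz then
      some (if offset = 0 then "UTC±0"
            else "UTC" ++ (if offset > 0 then "+" else "") ++ PySem.Int.toStr offset)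
    else pvLoopA1 tz rest

-- second loop: scan the fractional map
def pvLoopA2 (tz : String) : List (String × String) → Option String
  | [] => none
  | (offsetStr, zone) :: rest =>
    if zone == tz then some ("UTC" ++ offsetStr) else pvLoopA2 tz rest

def iana_to_display (tz : String) : String :=
  match pvLoopA1 tz pvOffsetMap with
  | some r => r
  | none =>
    match pvLoopA2 tz pvFracMap with
    | some r => r
    | none => tz

-- ===== PORT B =====
-- B's flat literal table _DISPLAY: zone ↦ finished display string (no formatting code)
def pvDisplay : PySem.Dict String String := PySem.Dict.mk [("Etc/GMT+12", "UTC-12"), ("Pacific/Pago_Pago", "UTC-11"), ("Pacific/Honolulu", "UTC-10"), ("America/Anchorage", "UTC-9"), ("America/Los_Angeles", "UTC-8"), ("America/Denver", "UTC-7"), ("America/Chicago", "UTC-6"), ("America/New_York", "UTC-5"), ("America/Halifax", "UTC-4"), ("America/Sao_Paulo", "UTC-3"), ("Atlantic/South_Georgia", "UTC-2"), ("Atlantic/Azores", "UTC-1"), ("Etc/GMT", "UTC±0"), ("Europe/London", "UTC+1"), ("Europe/Berlin", "UTC+2"), ("Europe/Moscow", "UTC+3"), ("Asia/Dubai", "UTC+4"),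 ("Asia/Karachi", "UTC+5"), ("Asia/Almaty", "UTC+6"), ("Asia/Bangkok", "UTC+7"), ("Asia/Shanghai", "UTC+8"), ("Asia/Tokyo", "UTC+9"), ("Australia/Sydney", "UTC+10"), ("Pacific/Noumea", "UTC+11"), ("Pacific/Auckland", "UTC+12"), ("Pacific/Apia", "UTC+13"), ("Pacific/Kiritimati", "UTC+14"), ("Asia/Tehran", "UTC+3:30"), ("Asia/Kabul", "UTC+4:30"), ("Asia/Kolkata", "UTC+5:30"), ("Asia/Kathmandu", "UTC+5:45"), ("Asia/Yangon", "UTC+6:30"), ("Australia/Darwin", "UTC+9:30"), ("America/St_Johns", "UTC-3:30"), ("Pacific/Marquesas", "UTC-9:30")]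

def iana_to_display_alt (tz : String) : String :=
  PySem.Dict.getD pvDisplay tz tz

-- ===== PRECONDITION & SPEC =====
def Spec_iana_to_display (tz : String) (out : String) : Prop := out = iana_to_display_alt tz
instance (tz : String) (out : String) : Decidable (Spec_iana_to_display tz out) := by unfold Spec_iana_to_display; infer_instance

-- ===== CLAIM =====
def Claim_equal_iana_to_display : Prop := ∀ (tz : String), Dom_iana_to_display tz → Spec_iana_to_display tz (iana_to_display tz)

-- ===== LEMMAS AND PROOFS =====
-- A's inline formatting of an integer offset, as a function (used only in proofs)
def pvFmt (o : Int) : String :=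
  if o = 0 then "UTC±0" else "UTC" ++ (if o > 0 then "+" else "") ++ PySem.Int.toStr o

theorem pvFind1 (tz : String) (L : List (Int × String)) :
    Option.map (·.2) (List.find? (fun p => p.1 == tz) (L.map (fun p => (p.2, pvFmt p.1)))) = pvLoopA1 tz L := by
  induction L with
  | nil => rfl
  | cons p rest ih =>
    obtain ⟨o, z⟩ := p
    simp only [List.map, List.find?, pvLoopA1]
    by_cases h : (z == tz) = true
    · simp [h, pvFmt]
    · simp only [h, Bool.false_eq_true, if_false, ih]

theorem pvFind2 (tz : String) (L : List (String × String)) :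
    Option.map (·.2) (List.find? (fun p => p.1 == tz) (L.map (fun p => (p.2, "UTC" ++ p.1)))) = pvLoopA2 tz L := by
  induction L with
  | nil => rfl
  | cons p rest ih =>
    obtain ⟨o, z⟩ := p
    simp only [List.map, List.find?, pvLoopA2]
    by_cases h : (z == tz) = true
    · simp [h]
    · simp only [h, Bool.false_eq_true, if_false, ih]

theorem pvDisplay_items :
    pvDisplay.items
      = (pvOffsetMap.map (fun p => (p.2, pvFmt p.1)))
        ++ (pvFracMap.map (fun p => (p.2, "UTC" ++ p.1))) := by
  decide

theorem iana_to_display_eq (tz : String) : iana_to_display tz = iana_to_display_alt tz := by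
  have h1 := pvFind1 tz pvOffsetMap
  have h2 := pvFind2 tz pvFracMap
  simp only [iana_to_display, iana_to_display_alt, PySem.Dict.getD, PySem.Dict.get?,
    pvDisplay_items, List.find?_append]
  cases hf1 : List.find? (fun p => p.1 == tz) (pvOffsetMap.map fun p => (p.2, pvFmt p.1)) with
  | some r =>
    rw [hf1] at h1
    simp [Option.or, ← h1]
  | none =>
    rw [hf1] at h1
    cases hf2 : List.find? (fun p => p.1 == tz) (pvFracMap.map fun p => (p.2, "UTC" ++ p.1)) with
    | some r =>
      rw [hf2] at h2
      simp [Option.or, ← h1, ← h2]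
    | none =>
      rw [hf2] at h2
      simp [Option.or, ← h1, ← h2]

-- ===== VERDICT =====
theorem iana_to_display_spec : Claim_equal_iana_to_display := by
  intro tz _
  unfold Spec_iana_to_display
  exact iana_to_display_eq tz
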